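-- pv_equiv track=rewrite | github.com/faiyaz72/codingPractice | Graphs/dfs.py | combination_without_repeat
-- ===== SOURCE A (Python) =====
-- from typing import List
--
-- def combination_without_repeat(nums: List[int], target: int):
--     nums.sort()
--     def dfs(total, path, res, seenNum):
--         if total == target:
--             res.append(path[:])
--             return
--         for i in range(len(nums)):
--             if seenNum.get(nums[i], False):  # Check if the element has been seen
--                 continue
--             seenNum[nums[i]] = True
--             path.append(nums[i])
--             dfs(total + nums[i], path, res, seenNum)
--             path.pop()
--             del seenNum[nums[i]]
--     res = []
--     dfs(0, [], res, {})
--     return res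
-- ===== SOURCE B (Python) =====
-- from typing import List
--
-- def combination_without_repeat(nums: List[int], target: int):
--     nums.sort()
--
--     def dfs(total, remaining):
--         if total == target:
--             return [[]]
--         return [[x] + suffix
--                 for x in remaining
--                 for suffix in dfs(total + x, [y for y in remaining if y != x])]
--
--     return dfs(0, nums)
-- ===== Notes on version B (the rewrite author's own statement) =====
-- stated objective: alternative
-- what changed: The shared-mutable-state DFS (appending to a shared res, pushing/popping a shared path, inserting/deleting in a shared seen dict while always rescanning all of nums) is replaced by a pure recursion on a shrinking candidate list: dfs(total, remaining) scans only `remaining`, recurses on `remaining` with every copy of the chosen value filtered out, and builds the result as a comprehension of prefixed suffixes — no seen-dict, path or result list exists.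
import Mathlib
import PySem

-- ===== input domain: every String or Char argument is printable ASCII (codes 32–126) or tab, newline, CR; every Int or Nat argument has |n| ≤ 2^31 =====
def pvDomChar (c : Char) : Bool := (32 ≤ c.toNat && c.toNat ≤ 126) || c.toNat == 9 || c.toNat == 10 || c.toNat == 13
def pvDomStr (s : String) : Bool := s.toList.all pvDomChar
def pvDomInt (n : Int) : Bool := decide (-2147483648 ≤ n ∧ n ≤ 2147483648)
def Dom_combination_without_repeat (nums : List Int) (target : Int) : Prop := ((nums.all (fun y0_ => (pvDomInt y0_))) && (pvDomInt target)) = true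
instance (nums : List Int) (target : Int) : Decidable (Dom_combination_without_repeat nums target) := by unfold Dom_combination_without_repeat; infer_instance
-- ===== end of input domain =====

-- A's mutable-state DFS (shared res/path/seen dict) vs B's pure recursion on a SHRINKING
-- candidate list (each level filters the chosen value out of `remaining`; no seen-set, path
-- or result list is threaded): same return value (note: both Pythons sort `nums` in place;
-- the equivalence proved here is about the return value).


-- ===== PORT A =====
-- dfs(total, path, res, seenNum): mutation is threaded as state; `path.append/pop` and
-- `seenNum[x]=True / del seenNum[x]` bracket the recursive call, so across loop iterations
-- `path`/`seen` are unchanged and only `res` is threaded through the fold.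
-- Fuel: each recursive call inserts a fresh value into `seen`, so the depth is at most
-- nums.length + 1 and fuel nums.length + 1 is never exhausted.
def pvDfsA (nums : List Int) (target : Int) : Nat → Int → List Int → PySem.Dict Int Bool → List (List Int) → List (List Int)
  | 0, _, _, _, res => res
  | fuel + 1, total, path, seen, res =>
    if total = target then res ++ [path]
    else
      nums.foldl (fun res x =>
        if seen.getD x false then res
        else pvDfsA nums target fuel (total + x) (path ++ [x]) (seen.insert x true) res) res

def combination_without_repeat (nums : List Int) (target : Int) : List (List Int) :=
  let sortedNums := PySem.List.sorted nums (fun v => v) false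
  pvDfsA sortedNums target (sortedNums.length + 1) 0 [] PySem.Dict.empty []

-- ===== PORT B =====
-- dfs(total, remaining): pure recursion; each level scans `remaining` and recurses on
-- `remaining` with every copy of the chosen value filtered out (the comprehension
-- `[[x] + suffix for x in remaining for suffix in dfs(total + x, [y for y in remaining if y != x])]`
-- is the flatMap below; `attach` only supplies the membership fact for termination).
def pvDfsB (target : Int) (total : Int) (remaining : List Int) : List (List Int) :=
  if total = target then [[]]
  else remaining.attach.flatMap (fun x =>
    (pvDfsB target (total + x.1) (remaining.filter (fun y => y != x.1))).map (fun s => x.1 :: s))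
termination_by remaining.length
decreasing_by
  have h : (remaining.filter (fun y => y != x.1)).length < remaining.length :=
    List.length_filter_lt_length_iff_exists.mpr ⟨x.1, x.2, by simp⟩
  simpa using h

def combination_without_repeat_alt (nums : List Int) (target : Int) : List (List Int) :=
  let sortedNums := PySem.List.sorted nums (fun v => v) false
  pvDfsB target 0 sortedNums

-- ===== PRECONDITION & SPEC =====
def Spec_combination_without_repeat (nums : List Int) (target : Int) (out : List (List Int)) : Prop := out = combination_without_repeat_alt nums target
instance (nums : List Int) (target : Int) (out : List (List Int)) : Decidable (Spec_combination_without_repeat nums target out) := by unfold Spec_combination_without_repeat; infer_instance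

-- ===== CLAIM (what is proved, stated in full; the proofs are below) =====
def Claim_equal_combination_without_repeat : Prop := ∀ (nums : List Int) (target : Int), Dom_combination_without_repeat nums target → Spec_combination_without_repeat nums target (combination_without_repeat nums target)

-- ===== LEMMAS AND PROOFS =====

-- flatMap over `attach` (used only for termination) is flatMap over the list itself.
theorem pvFlatMap_attach_val {α β : Type} (l : List α) (G : α → List β) :
    l.attach.flatMap (fun x => G x.1) = l.flatMap G := by
  conv_rhs => rw [← List.attach_map_subtype_val l, List.flatMap_def, List.map_map,
    ← List.flatMap_def]
  rfl

-- The `seen` dict of A and the `remaining` list of B represent complementary information: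
-- remaining = nums with the seen values filtered out.  Core simulation: A's state-threading
-- DFS equals res ++ (B's suffix list mapped under path).
theorem pvDfs_eq (nums : List Int) (target : Int) :
    ∀ (fuel : Nat) (total : Int) (path : List Int) (seen : PySem.Dict Int Bool)
      (remaining : List Int) (res : List (List Int)),
      remaining = nums.filter (fun y => !(seen.getD y false)) →
      remaining.length < fuel →
      pvDfsA nums target fuel total path seen res
        = res ++ (pvDfsB target total remaining).map (fun s => path ++ s) := by
  intro fuel
  induction fuel with
  | zero => intro _ _ _ _ _ _ h; omega
  | succ fuel ih =>
    intro total path seen remaining res hrem hlen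
    unfold pvDfsB
    by_cases h : total = target
    · simp [pvDfsA, h]
    · simp only [pvDfsA, if_neg h]
      -- A's fold over nums skipping seen values = fold over `remaining`
      have hskip : nums.foldl (fun res x =>
            if seen.getD x false then res
            else pvDfsA nums target fuel (total + x) (path ++ [x]) (seen.insert x true) res) res
          = remaining.foldl (fun res x =>
              pvDfsA nums target fuel (total + x) (path ++ [x]) (seen.insert x true) res) res := by
        have hfun : (fun (res : List (List Int)) x =>
              if seen.getD x false then res
              else pvDfsA nums target fuel (total + x) (path ++ [x]) (seen.insert x true) res)
            = (fun res x => if (!(seen.getD x false)) = true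
                then pvDfsA nums target fuel (total + x) (path ++ [x]) (seen.insert x true) res
                else res) := by
          funext acc x
          cases seen.getD x false <;> simp
        rw [hfun, ← List.foldl_filter, hrem]
      rw [hskip]
      -- fold over remaining = flatMap of B's branches, by induction over the traversed prefix
      have hfold : ∀ (l : List Int), (∀ x ∈ l, x ∈ remaining) → ∀ (acc : List (List Int)),
          l.foldl (fun res x =>
              pvDfsA nums target fuel (total + x) (path ++ [x]) (seen.insert x true) res) acc
          = acc ++ l.flatMap (fun x =>
              (pvDfsB target (total + x) (remaining.filter (fun y => y != x))).map
                (fun s => path ++ (x :: s))) := by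
        intro l
        induction l with
        | nil => intro _ acc; simp
        | cons x l ihl =>
          intro hsub acc
          have hx : x ∈ remaining := hsub x (List.mem_cons_self ..)
          have hrem' : remaining.filter (fun y => y != x)
              = nums.filter (fun y => !((seen.insert x true).getD y false)) := by
            rw [hrem, List.filter_filter]
            apply List.filter_congr
            intro y _
            rw [PySem.Dict.getD_insert]
            rcases eq_or_ne y x with rfl | hne
            · simp
            · simp [hne]
          have hlen' : (remaining.filter (fun y => y != x)).length < fuel := by
            have : (remaining.filter (fun y => y != x)).length < remaining.length :=
              List.length_filter_lt_length_iff_exists.mpr ⟨x, hx, by simp⟩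
            omega
          simp only [List.foldl_cons]
          rw [ih (total + x) (path ++ [x]) (seen.insert x true)
                (remaining.filter (fun y => y != x)) acc hrem' hlen']
          rw [ihl (fun y hy => hsub y (List.mem_cons_of_mem _ hy))]
          simp [List.append_assoc]
      rw [hfold remaining (fun _ h => h) res]
      rw [pvFlatMap_attach_val remaining (fun x =>
            (pvDfsB target (total + x) (remaining.filter (fun y => y != x))).map
              (fun s => x :: s))]
      simp only [List.map_flatMap, List.map_map]
      rfl

-- ===== VERDICT (by name: the statement is the Claim_ definition above) =====
theorem combination_without_repeat_spec : Claim_equal_combination_without_repeat := by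
  intro nums target _
  unfold Spec_combination_without_repeat combination_without_repeat combination_without_repeat_alt
  have h := pvDfs_eq (PySem.List.sorted nums (fun v => v) false) target
      ((PySem.List.sorted nums (fun v => v) false).length + 1) 0 [] PySem.Dict.empty
      (PySem.List.sorted nums (fun v => v) false) []
      (by simp [PySem.Dict.getD_empty]) (by omega)
  simpa using h
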